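-- pv_equiv track=rewrite | github.com/xfce-mirror/xfce4-windowck-plugin | themes/generator_common.py | hole_size
-- ===== SOURCE A (Python) =====
-- def hole_size(txt):
--     """ Detects hole on a xpm string, used to find border sizes."""
--     lastwidth = 0
--     inhole = 0
--     for line in txt.split("\n"):
--         if " " in line:
--             lastwidth = line.count(" ")
--             inhole += 1
--         elif inhole > 0:
--             return lastwidth, inhole
--     raise ValueError
-- ===== SOURCE B (Python) =====
-- def hole_size(txt):
--     """Find the first run of space-containing lines by index scanning; require a line after it."""
--     lines = txt.split("\n")
--     n = len(lines)
--     i = 0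
--     while i < n and " " not in lines[i]:
--         i += 1
--     j = i
--     while j < n and " " in lines[j]:
--         j += 1
--     if i == n or j == n:
--         raise ValueError
--     return lines[j - 1].count(" "), j - i
-- ===== Notes on version B (the rewrite author's own statement) =====
-- stated objective: alternative
-- what changed: Replaced A's running lastwidth/inhole state machine with an index-based run-boundary scan: find the start and end of the first space-containing run, then read the width from the run's last line and the hole height as the run length.
import Mathlib
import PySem

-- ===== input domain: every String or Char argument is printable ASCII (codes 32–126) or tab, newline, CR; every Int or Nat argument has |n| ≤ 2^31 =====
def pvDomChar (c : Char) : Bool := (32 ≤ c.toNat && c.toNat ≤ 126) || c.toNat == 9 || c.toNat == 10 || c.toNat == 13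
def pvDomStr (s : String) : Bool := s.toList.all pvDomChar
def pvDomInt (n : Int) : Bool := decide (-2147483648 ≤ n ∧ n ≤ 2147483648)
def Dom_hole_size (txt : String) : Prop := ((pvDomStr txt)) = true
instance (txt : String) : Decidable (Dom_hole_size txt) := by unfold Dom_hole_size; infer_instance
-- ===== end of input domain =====

-- B replaces A's running lastwidth/inhole state machine with an index-based scan for the
-- boundaries of the first space-containing run (alternative decomposition, same cost).

-- ===== PORT A =====
-- A's for-loop with early return; (0, 0) marks the fall-through where Python raises ValueError
-- (those inputs are excluded by Pre_hole_size)
def holeLoopA : List String → Int → Int → Int × Int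
  | [], _, _ => (0, 0)
  | line :: rest, lastwidth, inhole =>
    if PySem.Str.isIn " " line then
      holeLoopA rest (PySem.Str.count line " " : Int) (inhole + 1)
    else if inhole > 0 then (lastwidth, inhole)
    else holeLoopA rest lastwidth inhole

def hole_size (txt : String) : Int × Int :=
  holeLoopA ((PySem.Str.split? txt "\n").getD []) 0 0

-- ===== PORT B =====
-- the while-loops of Source B: how many leading lines satisfy p (the index the loop stops at)
def countWhileB (p : String → Bool) : List String → Nat
  | [] => 0
  | l :: rest => if p l then countWhileB p rest + 1 else 0

def hole_size_alt (txt : String) : Int × Int :=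
  let lines := (PySem.Str.split? txt "\n").getD []
  let n := lines.length
  let i := countWhileB (fun l => !PySem.Str.isIn " " l) lines
  let j := i + countWhileB (fun l => PySem.Str.isIn " " l) (lines.drop i)
  if i = n ∨ j = n then (0, 0)   -- raise ValueError (excluded by Pre_hole_size)
  else ((PySem.Str.count (lines.getD (j - 1) "") " " : Int), ((j - i : Nat) : Int))

-- ===== PRECONDITION & SPEC =====
-- Pre_ excludes exactly the inputs on which A raises ValueError (and B does too): those where
-- no line contains a space, or where the first run of space-containing lines reaches the end.
def Pre_hole_size (txt : String) : Prop :=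
  let lines := (PySem.Str.split? txt "\n").getD []
  ∃ i : Fin lines.length, PySem.Str.isIn " " lines[i] = true ∧
    ∃ j : Fin lines.length, (i : Nat) < (j : Nat) ∧ PySem.Str.isIn " " lines[j] = false
instance (txt : String) : Decidable (Pre_hole_size txt) := by unfold Pre_hole_size; infer_instance

def pvWitness_hole_size : String := " \na"

def Spec_hole_size (txt : String) (out : Int × Int) : Prop := out = hole_size_alt txt
instance (txt : String) (out : Int × Int) : Decidable (Spec_hole_size txt out) := by unfold Spec_hole_size; infer_instance

-- ===== CLAIM (what is proved, stated in full; the proofs are below) =====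
def Claim_equal_hole_size : Prop := ∀ (txt : String), Dom_hole_size txt → Pre_hole_size txt → Spec_hole_size txt (hole_size txt)

-- ===== LEMMAS AND PROOFS =====

-- A's loop ignores leading lines without a space (state unchanged at lastwidth = inhole = 0)
theorem holeLoopA_skip (pre t : List String)
    (h : ∀ l ∈ pre, PySem.Str.isIn " " l = false) :
    holeLoopA (pre ++ t) 0 0 = holeLoopA t 0 0 := by
  induction pre with
  | nil => rfl
  | cons l pre ih =>
    have hl := h l (by simp)
    rw [List.cons_append]
    simp only [holeLoopA]
    rw [if_neg (by rw [hl]; simp), if_neg (by norm_num)]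
    exact ih fun x hx => h x (by simp [hx])

-- A's loop on a nonempty all-space run followed by a spaceless line returns
-- (space count of the run's last line, inhole + run length)
theorem holeLoopA_run (run : List String) (x : String) (rest : List String)
    (lw ih : Int) (hih : 0 ≤ ih) (hne : run ≠ [])
    (hall : ∀ l ∈ run, PySem.Str.isIn " " l = true)
    (hx : PySem.Str.isIn " " x = false) :
    holeLoopA (run ++ x :: rest) lw ih
      = ((PySem.Str.count (run.getLast hne) " " : Int), ih + run.length) := by
  induction run generalizing lw ih with
  | nil => exact absurd rfl hne
  | cons l run ihr =>
    have hl := hall l (by simp)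
    cases run with
    | nil =>
      have hpos : (0 : Int) < ih + 1 := by omega
      simp only [List.cons_append, List.nil_append, holeLoopA]
      rw [if_pos hl, if_neg (by rw [hx]; simp), if_pos hpos]
      simp [List.getLast_singleton]
    | cons l2 run2 =>
      have hrec := ihr (PySem.Str.count l " ") (ih + 1) (by omega) (by simp)
        (fun y hy => hall y (List.mem_cons_of_mem l hy))
      simp only [List.cons_append, holeLoopA] at hrec ⊢
      rw [if_pos hl, hrec]
      refine Prod.ext ?_ ?_
      · simp [List.getLast_cons]
      · simp; ring

-- the index scan stops exactly at the first element failing p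
theorem countWhileB_append (p : String → Bool) (pre : List String) (x : String)
    (rest : List String) (h : ∀ l ∈ pre, p l = true) (hx : p x = false) :
    countWhileB p (pre ++ x :: rest) = pre.length := by
  induction pre with
  | nil => simp [countWhileB, hx]
  | cons l pre ih =>
    have hl := h l (by simp)
    simp [countWhileB, hl, ih fun y hy => h y (by simp [hy])]

-- the first element surviving dropWhile fails the predicate
theorem dropWhile_head_false {α : Type} (p : α → Bool) (l : List α) (a : α) (b : List α)
    (h : l.dropWhile p = a :: b) : p a = false := by
  induction l with
  | nil => simp at h
  | cons c l ih =>
    rw [List.dropWhile_cons] at h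
    by_cases hc : p c = true
    · exact ih (by simpa [hc] using h)
    · rw [if_neg hc] at h
      cases h
      simpa using hc

-- any list satisfying Pre_ splits as spaceless prefix ++ nonempty space run ++ spaceless line ++ rest
theorem pre_decomp (ls : List String)
    (h : ∃ i : Fin ls.length, PySem.Str.isIn " " ls[i] = true ∧
      ∃ j : Fin ls.length, (i : Nat) < (j : Nat) ∧ PySem.Str.isIn " " ls[j] = false) :
    ∃ pre run x rest, ls = pre ++ run ++ x :: rest ∧
      (∀ l ∈ pre, PySem.Str.isIn " " l = false) ∧ run ≠ [] ∧
      (∀ l ∈ run, PySem.Str.isIn " " l = true) ∧ PySem.Str.isIn " " x = false := by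
  obtain ⟨i, hi, j, hij, hj⟩ := h
  simp only [Fin.getElem_fin] at hi hj
  set pre := ls.takeWhile (fun l => !PySem.Str.isIn " " l) with hpre
  set d := ls.dropWhile (fun l => !PySem.Str.isIn " " l) with hd
  have hsplit : pre ++ d = ls := List.takeWhile_append_dropWhile
  have hpreall : ∀ l ∈ pre, PySem.Str.isIn " " l = false := by
    intro l hl
    rw [hpre] at hl
    have := List.mem_takeWhile_imp hl
    simpa using this
  have hiP : pre.length ≤ (i : Nat) := by
    by_contra hlt
    push Not at hlt
    have hpfx : pre <+: ls := by rw [hpre]; exact List.takeWhile_prefix _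
    have he : pre[(i : Nat)] = ls[(i : Nat)] := hpfx.getElem hlt
    have hf := hpreall _ (List.getElem_mem hlt)
    rw [he, hi] at hf
    cases hf
  have hlen : pre.length + d.length = ls.length := by
    rw [← hsplit, List.length_append]
  have hjlt : (j : Nat) - pre.length < d.length := by
    have := j.isLt; omega
  have hjd : d[(j : Nat) - pre.length]'hjlt = ls[(j : Nat)]'(j.isLt) := by
    have h5 : ls[(j : Nat)]'(j.isLt)
        = (pre ++ d)[(j : Nat)]'(by rw [hsplit]; exact j.isLt) :=
      List.getElem_of_eq hsplit.symm _
    rw [h5, List.getElem_append_right (by omega)]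
  have hdne : d ≠ [] := by
    intro h0
    rw [h0] at hjlt
    simp at hjlt
  obtain ⟨a, b, had⟩ := List.exists_cons_of_ne_nil hdne
  have hPa : PySem.Str.isIn " " a = true := by
    have h1 : ls.dropWhile (fun l => !PySem.Str.isIn " " l) = a :: b := by rw [← hd, had]
    have h2 := dropWhile_head_false _ _ _ _ h1
    simpa using h2
  set run := d.takeWhile (fun l => PySem.Str.isIn " " l) with hrun
  set t := d.dropWhile (fun l => PySem.Str.isIn " " l) with ht
  have hdsplit : run ++ t = d := List.takeWhile_append_dropWhile
  have hrunne : run ≠ [] := by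
    rw [hrun, had, List.takeWhile_cons_of_pos hPa]
    simp
  have hrunall : ∀ l ∈ run, PySem.Str.isIn " " l = true := by
    intro l hl
    rw [hrun] at hl
    exact List.mem_takeWhile_imp hl
  have htne : t ≠ [] := by
    intro h0
    have h1 : d.dropWhile (fun l => PySem.Str.isIn " " l) = [] := by rw [← ht]; exact h0
    have hall := List.dropWhile_eq_nil_iff.1 h1
    have := hall _ (List.getElem_mem hjlt)
    rw [hjd, hj] at this
    cases this
  obtain ⟨x, rest, hxt⟩ := List.exists_cons_of_ne_nil htne
  have h3 : d.dropWhile (fun l => PySem.Str.isIn " " l) = x :: rest := by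
    rw [← ht]; exact hxt
  have hx : PySem.Str.isIn " " x = false := dropWhile_head_false _ _ _ _ h3
  have hdeq : d = run ++ x :: rest := by rw [← hdsplit, hxt]
  exact ⟨pre, run, x, rest, by rw [← hsplit, hdeq, List.append_assoc], hpreall, hrunne,
    hrunall, hx⟩

-- ===== VERDICT (by name: the statement is the Claim_ definition above) =====
theorem hole_size_spec : Claim_equal_hole_size := by
  intro txt _ hpre
  unfold Spec_hole_size hole_size hole_size_alt
  obtain ⟨pre, run, x, rest, hls, hpreall, hrunne, hrunall, hx⟩ :=
    pre_decomp ((PySem.Str.split? txt "\n").getD []) hpre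
  set ls := (PySem.Str.split? txt "\n").getD []
  have hA : holeLoopA ls 0 0
      = ((PySem.Str.count (run.getLast hrunne) " " : Int), (0 : Int) + run.length) := by
    rw [hls, List.append_assoc, holeLoopA_skip _ _ hpreall,
      holeLoopA_run run x rest 0 0 le_rfl hrunne hrunall hx]
  obtain ⟨r0, run', hr0⟩ := List.exists_cons_of_ne_nil hrunne
  have hi : countWhileB (fun l => !PySem.Str.isIn " " l) ls = pre.length := by
    rw [hls, hr0, List.append_assoc, List.cons_append]
    exact countWhileB_append _ pre r0 (run' ++ x :: rest)
      (fun l hl => by simp only [hpreall l hl, Bool.not_false])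
      (by simp only [hrunall r0 (by rw [hr0]; simp), Bool.not_true])
  have hdrop : ls.drop pre.length = run ++ x :: rest := by
    rw [hls, List.append_assoc, List.drop_left]
  have hj : countWhileB (fun l => PySem.Str.isIn " " l) (run ++ x :: rest) = run.length :=
    countWhileB_append _ run x rest hrunall hx
  have hn : ls.length = pre.length + run.length + (rest.length + 1) := by
    rw [hls]; simp [List.length_append]; omega
  have hrunpos : 0 < run.length := List.length_pos_of_ne_nil hrunne
  simp only [hi, hdrop, hj]
  rw [if_neg (by omega)]
  have hgetD : ls.getD (pre.length + run.length - 1) "" = run.getLast hrunne := by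
    rw [hls]
    rw [List.getD_append _ _ _ _ (by rw [List.length_append]; omega)]
    rw [List.getD_append_right _ _ _ _ (by omega)]
    have h1 : pre.length + run.length - 1 - pre.length = run.length - 1 := by omega
    rw [h1, List.getD_eq_getElem _ _ (by omega), List.getLast_eq_getElem]
  rw [hgetD, hA]
  have h2 : pre.length + run.length - pre.length = run.length := by omega
  rw [h2]
  norm_num
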